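-- pv_equiv track=rewrite | github.com/xiaohan52/OneForall | Python_dates/Learn/函数/demo_day52函数返回值.py | calComputer
-- ===== SOURCE A (Python) =====
-- def calComputer(num):
--     result = 0
--     i = 1
--     while i<=num:
--         result+=1
--         i+=1
--         pass
--     return result
-- ===== SOURCE B (Python) =====
-- def calComputer(num):
--     return num if num >= 1 else 0
-- ===== Notes on version B (the rewrite author's own statement) =====
-- stated objective: faster
-- what changed: Replaced the O(num) counting while-loop with the closed form max(num, 0).
import Mathlib
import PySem

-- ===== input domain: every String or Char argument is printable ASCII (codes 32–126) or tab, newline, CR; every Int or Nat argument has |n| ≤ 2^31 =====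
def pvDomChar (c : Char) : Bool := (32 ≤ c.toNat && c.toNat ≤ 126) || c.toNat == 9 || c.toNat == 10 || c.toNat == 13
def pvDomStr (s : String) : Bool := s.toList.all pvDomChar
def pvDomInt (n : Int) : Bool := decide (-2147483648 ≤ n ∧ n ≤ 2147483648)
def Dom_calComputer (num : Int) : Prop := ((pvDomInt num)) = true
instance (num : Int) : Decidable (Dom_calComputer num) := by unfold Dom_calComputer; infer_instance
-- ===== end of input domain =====

-- B replaces A's O(num) counting while-loop by the closed form max(num, 0).

-- ===== PORT A =====
-- the while loop 'while i<=num: result+=1; i+=1', with fuel bounding the iteration count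
def calGo (num : Int) (fuel : Nat) (i result : Int) : Int :=
  match fuel with
  | 0 => result
  | f + 1 => if i ≤ num then calGo num f (i + 1) (result + 1) else result

def calComputer (num : Int) : Int := calGo num num.toNat 1 0

-- ===== PORT B =====
def calComputer_alt (num : Int) : Int := if num ≥ 1 then num else 0

-- ===== PRECONDITION & SPEC =====
def Spec_calComputer (num : Int) (out : Int) : Prop := out = calComputer_alt num
instance (num : Int) (out : Int) : Decidable (Spec_calComputer num out) := by unfold Spec_calComputer; infer_instance

-- ===== CLAIM (what is proved, stated in full; the proofs are below) =====
def Claim_equal_calComputer : Prop := ∀ (num : Int), Dom_calComputer num → Spec_calComputer num (calComputer num)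

-- ===== LEMMAS AND PROOFS =====
theorem calGo_eq (num : Int) : ∀ (fuel : Nat) (i result : Int),
    (num + 1 - i).toNat ≤ fuel → calGo num fuel i result = result + max (num + 1 - i) 0 := by
  intro fuel
  induction fuel with
  | zero => intro i result h; simp [calGo]; omega
  | succ f ih =>
    intro i result h
    simp only [calGo]
    split_ifs with hi
    · rw [ih (i + 1) (result + 1) (by omega)]; omega
    · omega

-- ===== VERDICT (by name: the statement is the Claim_ definition above) =====
theorem calComputer_spec : Claim_equal_calComputer := by
  intro num _
  unfold Spec_calComputer calComputer calComputer_alt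
  rw [calGo_eq num num.toNat 1 0 (by omega)]
  split_ifs <;> omega
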